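-- pv_equiv track=rewrite | github.com/ahmed507/Algorithms-and-Data-Structures-training---IEEE-CS-ZSB | CS21-Science-Week-4/Is it rated.py | is_rated
-- ===== SOURCE A (Python) =====
-- def is_rated(a, b):
--     for i in range(len(a)):
--         if a[i] != b[i]:
--             return "rated"
--     for j in range(1, len(a)):
--         if a[j] > a[j-1]:
--             return "unrated"
--     return "maybe"
-- ===== SOURCE B (Python) =====
-- def is_rated(a, b):
--     if a != b[:len(a)]:
--         return "rated"
--     return "maybe" if a == sorted(a, reverse=True) else "unrated"
-- ===== Notes on version B (the rewrite author's own statement) =====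
-- stated objective: idiomatic
-- what changed: Replaces A's two index loops by a single prefix list-equality test (a != b[:len(a)]) and a sort-and-compare non-increasing check (a == sorted(a, reverse=True)).
import Mathlib
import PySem

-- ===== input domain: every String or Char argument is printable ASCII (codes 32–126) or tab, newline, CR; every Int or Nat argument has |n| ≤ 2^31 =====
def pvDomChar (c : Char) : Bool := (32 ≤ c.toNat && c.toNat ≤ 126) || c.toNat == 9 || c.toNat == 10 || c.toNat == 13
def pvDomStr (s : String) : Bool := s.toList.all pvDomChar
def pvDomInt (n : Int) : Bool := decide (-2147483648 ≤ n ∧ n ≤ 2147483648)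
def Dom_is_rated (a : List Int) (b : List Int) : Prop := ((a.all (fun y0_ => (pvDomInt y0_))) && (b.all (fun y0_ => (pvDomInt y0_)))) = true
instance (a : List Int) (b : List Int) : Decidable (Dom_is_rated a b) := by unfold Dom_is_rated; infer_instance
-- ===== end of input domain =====

-- B replaces A's two index loops by a prefix list-equality test and a sort-and-compare
-- non-increasing check (idiomatic, same task). Where A raises IndexError (b a strict
-- prefix of a) B returns "rated"; those inputs are outside Pre_is_rated.

-- ===== PORT A =====
-- first loop: for i in range(len(a)): if a[i] != b[i]: return "rated"
-- (walks a with b alongside; none = IndexError when b[i] is out of range)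
def isRatedLoop1 : List Int → List Int → Option Bool
  | [], _ => some false
  | _ :: _, [] => none
  | x :: xs, y :: ys => if x ≠ y then some true else isRatedLoop1 xs ys

-- second loop: for j in range(1, len(a)): if a[j] > a[j-1]: return "unrated"
-- (compares each element with its predecessor)
def isRatedLoop2 : List Int → Bool
  | x :: y :: rest => if y > x then true else isRatedLoop2 (y :: rest)
  | _ => false

def is_rated (a : List Int) (b : List Int) : String :=
  match isRatedLoop1 a b with
  | none => ""          -- IndexError: unreachable under Pre_is_rated
  | some true => "rated"
  | some false => if isRatedLoop2 a then "unrated" else "maybe"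

-- ===== PORT B =====
def is_rated_alt (a : List Int) (b : List Int) : String :=
  if a ≠ PySem.List.slice b none (some (a.length : Int)) then "rated"
  else if a = PySem.List.sorted a (fun x => x) true then "maybe" else "unrated"

-- ===== PRECONDITION & SPEC =====
-- Pre_ excludes exactly the inputs where A raises IndexError: b a strict prefix of a.
def Pre_is_rated (a : List Int) (b : List Int) : Prop :=
  ¬ (b.length < a.length ∧ a.take b.length = b)
instance (a : List Int) (b : List Int) : Decidable (Pre_is_rated a b) := by
  unfold Pre_is_rated; infer_instance
def pvWitness_is_rated : List Int × List Int := ([1, 2, 3], [1, 2, 3])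

def Spec_is_rated (a : List Int) (b : List Int) (out : String) : Prop := out = is_rated_alt a b
instance (a : List Int) (b : List Int) (out : String) : Decidable (Spec_is_rated a b out) := by unfold Spec_is_rated; infer_instance

-- ===== CLAIM (what is proved, stated in full; the proofs are below) =====
def Claim_equal_is_rated : Prop := ∀ (a : List Int) (b : List Int), Dom_is_rated a b → Pre_is_rated a b → Spec_is_rated a b (is_rated a b)

-- ===== LEMMAS AND PROOFS =====

-- Under Pre_, the first loop computes the prefix-equality test of B.
theorem loop1_eq (a b : List Int) (h : Pre_is_rated a b) :
    isRatedLoop1 a b = some (decide ¬ (a = b.take a.length)) := by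
  induction a generalizing b with
  | nil => simp [isRatedLoop1]
  | cons x xs ih =>
    cases b with
    | nil =>
      exact absurd (by simp [Pre_is_rated]) (not_not.mpr h)
    | cons y ys =>
      by_cases hxy : x = y
      · subst hxy
        have hpre : Pre_is_rated xs ys := by
          intro ⟨h1, h2⟩
          exact h ⟨by simpa using h1, by simp [h2]⟩
        simp [isRatedLoop1, ih ys hpre]
      · simp [isRatedLoop1, hxy]

-- The second loop returns false exactly on non-increasing lists.
theorem loop2_eq_false_iff (a : List Int) :
    isRatedLoop2 a = false ↔ a.Pairwise (fun x y => y ≤ x) := by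
  induction a with
  | nil => simp [isRatedLoop2]
  | cons x xs ih =>
    cases xs with
    | nil => simp [isRatedLoop2]
    | cons y ys =>
      rw [List.pairwise_cons]
      by_cases hxy : y > x
      · constructor
        · intro h'; simp [isRatedLoop2, hxy] at h'
        · intro ⟨h1, _⟩
          exact absurd (h1 y (List.mem_cons_self)) (by omega)
      · have hstep : isRatedLoop2 (x :: y :: ys) = isRatedLoop2 (y :: ys) := by
          simp [isRatedLoop2, hxy]
        rw [hstep, ih]
        constructor
        · intro hp
          refine ⟨?_, hp⟩
          rw [List.pairwise_cons] at hp
          intro z hz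
          rcases List.mem_cons.mp hz with rfl | hz'
          · omega
          · exact le_trans (hp.1 z hz') (by omega)
        · exact fun h => h.2

-- a == sorted(a, reverse=True) iff a is non-increasing.
theorem sorted_rev_eq_iff (a : List Int) :
    a = PySem.List.sorted a (fun x => x) true ↔ a.Pairwise (fun x y => y ≤ x) := by
  constructor
  · intro h
    have hp := PySem.List.sorted_pairwise_rev (xs := a) (key := fun x => x)
    rw [← h] at hp
    simpa using hp
  · intro hp
    exact (PySem.List.sorted_rev_eq_self_of_pairwise a (fun x => x) hp).symm

-- ===== VERDICT (by name: the statement is the Claim_ definition above) =====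
theorem is_rated_spec : Claim_equal_is_rated := by
  intro a b _ hpre
  unfold Spec_is_rated is_rated is_rated_alt
  rw [loop1_eq a b hpre, PySem.List.slice_to_natCast]
  by_cases heq : a = b.take a.length
  · have h1 : (decide ¬ (a = b.take a.length)) = false := by
      rw [decide_eq_false_iff_not]; exact not_not_intro heq
    rw [h1, if_neg (not_not_intro heq)]
    show (if isRatedLoop2 a then "unrated" else "maybe") = _
    by_cases hs : a = PySem.List.sorted a (fun x => x) true
    · rw [if_pos hs, (loop2_eq_false_iff a).mpr ((sorted_rev_eq_iff a).mp hs)]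
      rfl
    · have ht : isRatedLoop2 a = true := by
        cases hb : isRatedLoop2 a
        · exact absurd ((sorted_rev_eq_iff a).mpr ((loop2_eq_false_iff a).mp hb)) hs
        · rfl
      rw [ht, if_neg hs]
      rfl
  · have h1 : (decide ¬ (a = b.take a.length)) = true := decide_eq_true heq
    rw [h1, if_pos heq]
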